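-- pv_equiv track=rewrite | github.com/unicamp-dl/Lissard | src/repeat_copy_logic/spanish.py | x_hello_world_not_say_world_every_even_time
-- ===== SOURCE A (Python) =====
-- def x_hello_world_not_say_world_every_even_time(times):
--     '''
--     Di 'hola mundo' 5 veces, pero no digas 'mundo' cada vez,
--     '''
--     out = ''
--     count = 0
--     for x in range(0, times):
--         if count == 1:
--             out+='hola '
--             count=0
--         else:
--             out+='hola mundo '
--             count+=1
--     return out.strip()
-- ===== SOURCE B (Python) =====
-- def x_hello_world_not_say_world_every_even_time(times):
--     if times <= 0:
--         return ''
--     pairs, rem = divmod(times, 2)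
--     out = 'hola mundo hola ' * pairs
--     if rem == 1:
--         out += 'hola mundo '
--     return out.strip()
-- ===== Notes on version B (the rewrite author's own statement) =====
-- stated objective: simpler
-- what changed: Replaced the toggling-counter loop with arithmetic: the fixed block covering a pair of iterations is repeated by string multiplication, a tail block is appended when the count is odd, and the result is stripped.
import Mathlib
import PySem

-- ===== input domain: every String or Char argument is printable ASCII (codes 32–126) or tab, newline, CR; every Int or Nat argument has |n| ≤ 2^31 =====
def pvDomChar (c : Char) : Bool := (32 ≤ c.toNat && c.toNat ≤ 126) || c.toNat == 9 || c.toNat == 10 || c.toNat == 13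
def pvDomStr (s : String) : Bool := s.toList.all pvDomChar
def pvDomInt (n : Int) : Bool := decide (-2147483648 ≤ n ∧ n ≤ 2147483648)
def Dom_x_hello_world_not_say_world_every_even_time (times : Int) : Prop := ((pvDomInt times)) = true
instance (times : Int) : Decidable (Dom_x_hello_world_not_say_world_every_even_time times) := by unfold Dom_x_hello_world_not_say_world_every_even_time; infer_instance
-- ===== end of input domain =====

-- B builds the result arithmetically ("hola mundo hola " * (times // 2) plus a tail for odd
-- times) instead of A's toggling-counter loop; objective: simpler.

-- ===== PORT A =====
-- loop body: the for-x-in-range loop's state is (out, count)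
def pvBodyA (st : String × Int) (_x : Int) : String × Int :=
  if st.2 == (1 : Int) then (st.1 ++ "hola ", 0) else (st.1 ++ "hola mundo ", st.2 + 1)

def x_hello_world_not_say_world_every_even_time (times : Int) : String :=
  let r := (PySem.List.pyRange 0 times 1).foldl pvBodyA ("", (0 : Int))
  PySem.Str.strip r.1

-- ===== PORT B =====
-- 's * pairs' (pairs ≥ 0 after the times ≤ 0 guard, so .toNat is exact)
def pvRepStr (s : String) : Nat → String
  | 0 => ""
  | n + 1 => pvRepStr s n ++ s

def x_hello_world_not_say_world_every_even_time_alt (times : Int) : String :=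
  if times ≤ 0 then "" else
    let pairs := PySem.Int.floordiv times 2
    let rem := PySem.Int.mod times 2
    let out := pvRepStr "hola mundo hola " pairs.toNat
    let out := if rem == 1 then out ++ "hola mundo " else out
    PySem.Str.strip out

-- ===== PRECONDITION & SPEC =====
def Spec_x_hello_world_not_say_world_every_even_time (times : Int) (out : String) : Prop := out = x_hello_world_not_say_world_every_even_time_alt times
instance (times : Int) (out : String) : Decidable (Spec_x_hello_world_not_say_world_every_even_time times out) := by unfold Spec_x_hello_world_not_say_world_every_even_time; infer_instance

-- ===== CLAIM (what is proved, stated in full; the proofs are below) =====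
def Claim_equal_x_hello_world_not_say_world_every_even_time : Prop := ∀ (times : Int), Dom_x_hello_world_not_say_world_every_even_time times → Spec_x_hello_world_not_say_world_every_even_time times (x_hello_world_not_say_world_every_even_time times)

-- ===== LEMMAS AND PROOFS =====

-- A's loop over n iterations, started at count 0, yields B's closed form with count n % 2.
theorem pvLoopA_closed (n : Nat) :
    (PySem.List.pyRange 0 (n : Int) 1).foldl pvBodyA ("", 0)
      = (pvRepStr "hola mundo hola " (n / 2) ++ (if n % 2 = 1 then "hola mundo " else ""),
         ((n % 2 : Nat) : Int)) := by
  induction n with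
  | zero => simp [pvRepStr]
  | succ n ih =>
    have h : PySem.List.pyRange 0 ((n + 1 : Nat) : Int) 1
        = PySem.List.pyRange 0 (n : Int) 1 ++ [(n : Int)] := by
      have := PySem.List.pyRange_one_succ_right (a := 0) (b := (n : Int)) (by positivity)
      push_cast
      simpa using this
    rw [h, List.foldl_append, ih]
    rcases Nat.even_or_odd n with he | ho
    · obtain ⟨k, hk⟩ := he
      have h2 : n % 2 = 0 := by omega
      have h3 : (n + 1) % 2 = 1 := by omega
      have h4 : (n + 1) / 2 = n / 2 := by omega
      simp [pvBodyA, h2, h3, h4]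
    · obtain ⟨k, hk⟩ := ho
      have h2 : n % 2 = 1 := by omega
      have h3 : (n + 1) % 2 = 0 := by omega
      have h4 : (n + 1) / 2 = n / 2 + 1 := by omega
      simp only [pvBodyA, h2, h3, h4, if_pos, List.foldl_cons, List.foldl_nil]
      norm_num [pvRepStr]
      rw [String.append_assoc]
      rfl

-- ===== VERDICT (by name: the statement is the Claim_ definition above) =====
theorem x_hello_world_not_say_world_every_even_time_spec : Claim_equal_x_hello_world_not_say_world_every_even_time := by
  intro times _
  unfold Spec_x_hello_world_not_say_world_every_even_time
  unfold x_hello_world_not_say_world_every_even_time x_hello_world_not_say_world_every_even_time_alt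
  by_cases hle : times ≤ 0
  · simp [PySem.List.pyRange_one_eq_nil hle, hle]
    rfl
  · rw [not_le] at hle
    rw [if_neg (by omega)]
    obtain ⟨n, hn⟩ : ∃ n : Nat, times = (n : Int) := ⟨times.toNat, (Int.toNat_of_nonneg (by omega)).symm⟩
    subst hn
    rw [pvLoopA_closed n]
    have hfd : (PySem.Int.floordiv (n : Int) 2).toNat = n / 2 := by
      have h := PySem.Int.floordiv_eq_ediv_of_pos (a := (n : Int)) (b := 2) (by norm_num)
      omega
    have hmd : PySem.Int.mod (n : Int) 2 = ((n % 2 : Nat) : Int) := by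
      have h := PySem.Int.mod_eq_emod_of_pos (a := (n : Int)) (b := 2) (by norm_num)
      omega
    simp only [hfd, hmd]
    rcases Nat.even_or_odd n with he | ho
    · simp [Nat.even_iff.mp he]
    · simp [Nat.odd_iff.mp ho]
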